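-- pv_equiv track=rewrite | github.com/shepherd03/Text2ToWorkflow | src/dsl_generation/compiler.py | _match_output_field
-- ===== SOURCE A (Python) =====
-- def _match_output_field(
--
--     input_name: str,
--     outputs: list[str],
--     allow_single_output_fallback: bool = True,
-- ) -> str | None:
--     if not outputs:
--         return None
--     normalized_input = input_name.lower()
--     for output in outputs:
--         if output == input_name:
--             return output
--     for output in outputs:
--         normalized_output = output.lower()
--         if normalized_output == normalized_input:
--             return output
--     for output in outputs:
--         normalized_output = output.lower()
--         if normalized_input in normalized_output or normalized_output in normalized_input:
--             return output
--     return outputs[0] if allow_single_output_fallback and len(outputs) == 1 else None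
-- ===== SOURCE B (Python) =====
-- def _match_output_field(
--     input_name: str,
--     outputs: list[str],
--     allow_single_output_fallback: bool = True,
-- ) -> str | None:
--     # Single pass: record the first match of each tier; break early on an exact match.
--     if not outputs:
--         return None
--     normalized_input = input_name.lower()
--     exact = ci = sub = None
--     for output in outputs:
--         if output == input_name:
--             exact = output
--             break
--         normalized_output = output.lower()
--         if ci is None and normalized_output == normalized_input:
--             ci = output
--         if sub is None and (normalized_input in normalized_output or normalized_output in normalized_input):
--             sub = output
--     if exact is not None:
--         return exact
--     if ci is not None:
--         return ci
--     if sub is not None: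
--         return sub
--     return outputs[0] if allow_single_output_fallback and len(outputs) == 1 else None
-- ===== Notes on version B (the rewrite author's own statement) =====
-- stated objective: alternative
-- what changed: Replaced A's three sequential scans over outputs with one single-pass loop that independently records the first exact, first case-insensitive and first substring match (breaking early on exact), then resolves the tier priority after the loop.
import Mathlib
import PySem

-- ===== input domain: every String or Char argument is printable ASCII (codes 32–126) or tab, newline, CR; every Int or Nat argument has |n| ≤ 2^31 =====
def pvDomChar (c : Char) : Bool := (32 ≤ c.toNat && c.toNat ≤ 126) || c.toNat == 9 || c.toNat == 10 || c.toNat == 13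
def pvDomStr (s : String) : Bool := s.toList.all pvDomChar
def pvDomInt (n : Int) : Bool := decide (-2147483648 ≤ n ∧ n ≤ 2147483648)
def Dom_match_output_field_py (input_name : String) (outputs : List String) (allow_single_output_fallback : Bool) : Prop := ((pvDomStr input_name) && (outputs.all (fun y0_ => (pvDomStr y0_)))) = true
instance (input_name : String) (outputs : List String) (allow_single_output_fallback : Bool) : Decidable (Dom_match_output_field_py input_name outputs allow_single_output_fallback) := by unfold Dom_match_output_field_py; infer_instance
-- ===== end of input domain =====

-- B replaces A's three sequential scans by one single-pass loop recording each tier's first match (alternative decomposition, same cost).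

-- ===== PORT A =====
-- first pass: first exact match
def findExactA (input_name : String) : List String → Option String
  | [] => none
  | o :: rest => if o == input_name then some o else findExactA input_name rest

-- second pass: first case-insensitive match
def findCiA (ninp : String) : List String → Option String
  | [] => none
  | o :: rest => if PySem.Str.lower o == ninp then some o else findCiA ninp rest

-- third pass: first substring match (either direction)
def findSubA (ninp : String) : List String → Option String
  | [] => none
  | o :: rest =>
      if PySem.Chars.isIn ninp.toList (PySem.Str.lower o).toList
          || PySem.Chars.isIn (PySem.Str.lower o).toList ninp.toList then some o
      else findSubA ninp rest

def match_output_field_py (input_name : String) (outputs : List String) (allow_single_output_fallback : Bool) : Option String :=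
  match outputs with
  | [] => none
  | o0 :: _ =>
    let ninp := PySem.Str.lower input_name
    match findExactA input_name outputs with
    | some o => some o
    | none =>
      match findCiA ninp outputs with
      | some o => some o
      | none =>
        match findSubA ninp outputs with
        | some o => some o
        | none => if allow_single_output_fallback && outputs.length == 1 then some o0 else none

-- ===== PORT B =====
-- the single loop: carries (ci, sub) accumulators, breaks (stops) on an exact match
def scanB (input_name ninp : String) : List String → Option String → Option String → Option String × Option String × Option String
  | [], ci, sub => (none, ci, sub)
  | o :: rest, ci, sub =>
      if o == input_name then (some o, ci, sub)
      else
        let no := PySem.Str.lower o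
        let ci' := if ci.isNone && (no == ninp) then some o else ci
        let sub' := if sub.isNone && (PySem.Chars.isIn ninp.toList no.toList || PySem.Chars.isIn no.toList ninp.toList) then some o else sub
        scanB input_name ninp rest ci' sub'

def match_output_field_py_alt (input_name : String) (outputs : List String) (allow_single_output_fallback : Bool) : Option String :=
  match outputs with
  | [] => none
  | o0 :: _ =>
    let ninp := PySem.Str.lower input_name
    match scanB input_name ninp outputs none none with
    | (some e, _, _) => some e
    | (none, some c, _) => some c
    | (none, none, some s) => some s
    | (none, none, none) => if allow_single_output_fallback && outputs.length == 1 then some o0 else none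

-- ===== PRECONDITION & SPEC =====
def Spec_match_output_field_py (input_name : String) (outputs : List String) (allow_single_output_fallback : Bool) (out : Option String) : Prop := out = match_output_field_py_alt input_name outputs allow_single_output_fallback
instance (input_name : String) (outputs : List String) (allow_single_output_fallback : Bool) (out : Option String) : Decidable (Spec_match_output_field_py input_name outputs allow_single_output_fallback out) := by unfold Spec_match_output_field_py; infer_instance

-- ===== CLAIM (what is proved, stated in full; the proofs are below) =====
def Claim_equal_match_output_field_py : Prop := ∀ (input_name : String) (outputs : List String) (allow_single_output_fallback : Bool), Dom_match_output_field_py input_name outputs allow_single_output_fallback → Spec_match_output_field_py input_name outputs allow_single_output_fallback (match_output_field_py input_name outputs allow_single_output_fallback)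

-- ===== LEMMAS AND PROOFS =====

theorem scanB_fst (inp ninp : String) (l : List String) (ci sub : Option String) :
    (scanB inp ninp l ci sub).1 = findExactA inp l := by
  induction l generalizing ci sub with
  | nil => simp [scanB, findExactA]
  | cons o rest ih =>
    simp only [scanB, findExactA]
    split
    · rfl
    · exact ih _ _

theorem scanB_of_no_exact (inp ninp : String) (l : List String) (ci sub : Option String)
    (h : findExactA inp l = none) :
    scanB inp ninp l ci sub = (none, ci.or (findCiA ninp l), sub.or (findSubA ninp l)) := by
  induction l generalizing ci sub with
  | nil => simp [scanB, findCiA, findSubA]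
  | cons o rest ih =>
    by_cases he : (o == inp) = true
    · rw [findExactA, if_pos he] at h
      exact absurd h (by simp)
    · rw [findExactA, if_neg he] at h
      rw [scanB, if_neg he, ih _ _ h, findCiA, findSubA]
      simp only [Prod.mk.injEq]
      refine ⟨trivial, ?_, ?_⟩
      · cases ci with
        | none => simp only [Option.isNone_none, Bool.true_and, Option.none_or]
                  split <;> simp
        | some c => simp
      · cases sub with
        | none => simp only [Option.isNone_none, Bool.true_and, Option.none_or]
                  split <;> simp
        | some s => simp

-- ===== VERDICT (by name: the statement is the Claim_ definition above) =====
theorem match_output_field_py_spec : Claim_equal_match_output_field_py := by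
  intro inp outputs allow _
  unfold Spec_match_output_field_py match_output_field_py match_output_field_py_alt
  cases outputs with
  | nil => rfl
  | cons o0 rest =>
    simp only
    cases he : findExactA inp (o0 :: rest) with
    | some e =>
      have h1 := scanB_fst inp (PySem.Str.lower inp) (o0 :: rest) none none
      rw [he] at h1
      rcases hs : scanB inp (PySem.Str.lower inp) (o0 :: rest) none none with ⟨a, b, c⟩
      rw [hs] at h1; simp at h1; subst h1; rfl
    | none =>
      rw [scanB_of_no_exact _ _ _ _ _ he]
      simp only [Option.or]
      cases findCiA (PySem.Str.lower inp) (o0 :: rest) with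
      | some c => rfl
      | none =>
        cases findSubA (PySem.Str.lower inp) (o0 :: rest) with
        | some s => rfl
        | none => rfl
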